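-- pv_equiv track=rewrite | github.com/MaxRandle/Python-projects | insult_generator_2.1.py | recurse
-- ===== SOURCE A (Python) =====
-- def recurse(d, x):
--     """adds the list x to the dictionary d"""
--     if len(x) >= 2:
--         if x[0] in d:
--             if x[1] not in d[x[0]]:
--                 d[x[0]] += [x[1]]
--         else:
--             d[x[0]] = [x[1]]
--         d = recurse(d, x[1::])
--     return d
-- ===== SOURCE B (Python) =====
-- def recurse(d, x):
--     """adds the list x to the dictionary d (group-by-key rebuild; return value only, does not mutate d)"""
--     pairs = list(zip(x, x[1:]))
--     keys = list(d)
--     for a, _ in pairs: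
--         if a not in keys:
--             keys.append(a)
--     out = {}
--     for k in keys:
--         vs = list(d[k]) if k in d else []
--         for a, b in pairs:
--             if a == k and b not in vs:
--                 vs.append(b)
--         out[k] = vs
--     return out
-- ===== Notes on version B (the rewrite author's own statement) =====
-- stated objective: alternative
-- what changed: Replaced A's x[1:]-slicing recursion that updates the dict pair by pair with a staged group-by rebuild: collect the consecutive pairs once, compute the final key order (existing keys then first-appearance new keys), and build each key's distinct successor list in one scan per key; Pre_ only requires the association list to have no duplicate keys, i.e. to actually represent a Python dict.
import Mathlib
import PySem

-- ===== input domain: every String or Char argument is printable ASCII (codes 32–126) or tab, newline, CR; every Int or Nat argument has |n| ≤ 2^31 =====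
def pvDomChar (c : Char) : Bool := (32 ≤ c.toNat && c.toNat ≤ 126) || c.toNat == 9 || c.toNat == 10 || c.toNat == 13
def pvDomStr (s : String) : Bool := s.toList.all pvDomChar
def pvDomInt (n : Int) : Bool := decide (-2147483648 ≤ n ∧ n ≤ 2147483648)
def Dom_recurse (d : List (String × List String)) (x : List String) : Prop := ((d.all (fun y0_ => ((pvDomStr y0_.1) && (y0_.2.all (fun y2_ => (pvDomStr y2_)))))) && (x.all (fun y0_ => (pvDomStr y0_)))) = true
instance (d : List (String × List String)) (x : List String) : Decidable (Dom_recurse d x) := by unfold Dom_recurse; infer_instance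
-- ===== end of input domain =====

-- B rebuilds the dict by key groups instead of A's x[1:]-slicing pairwise recursion; return-value equivalence only (Python A mutates d in place, B does not).

-- ===== PORT A =====
-- Python-dict primitives on the association list: first-match lookup; in-place overwrite, new keys appended
def pvDGet? (d : List (String × List String)) (k : String) : Option (List String) :=
  match d with
  | [] => none
  | (k', v) :: r => if k' = k then some v else pvDGet? r k

def pvDSet (d : List (String × List String)) (k : String) (v : List String) : List (String × List String) :=
  match d with
  | [] => [(k, v)]
  | (k', v') :: r => if k' = k then (k', v) :: r else (k', v') :: pvDSet r k v

-- one update step of A: d[x0] += [x1] if new, else d[x0] = [x1]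
def pvStep (d : List (String × List String)) (a b : String) : List (String × List String) :=
  match pvDGet? d a with
  | some vs => if b ∈ vs then d else pvDSet d a (vs ++ [b])
  | none => pvDSet d a [b]

def recurse (d : List (String × List String)) (x : List String) : List (String × List String) :=
  match x with
  | a :: b :: rest => recurse (pvStep d a b) (b :: rest)
  | _ => d

-- ===== PORT B =====
-- key order of the result: existing keys, then new keys in first-appearance order among the pairs
def bKeys (ks : List String) (ps : List (String × String)) : List String :=
  ps.foldl (fun ks p => if p.1 ∈ ks then ks else ks ++ [p.1]) ks

-- successor list for key k: initial value extended by the distinct new successors, in order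
def bVal (vs : List String) (k : String) (ps : List (String × String)) : List String :=
  ps.foldl (fun vs p => if p.1 = k then (if p.2 ∈ vs then vs else vs ++ [p.2]) else vs) vs

def recurse_alt (d : List (String × List String)) (x : List String) : List (String × List String) :=
  let ps := x.zip (x.drop 1)
  (bKeys (d.map Prod.fst) ps).map (fun k => (k, bVal ((pvDGet? d k).getD []) k ps))

-- ===== PRECONDITION & SPEC =====
-- Pre_ admits exactly the association lists that represent a Python dict: no duplicate keys
-- (a duplicate-keyed list is not the image of any dict argument the Python functions can receive).
def Pre_recurse (d : List (String × List String)) (x : List String) : Prop :=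
  (d.map Prod.fst).Nodup
instance (d : List (String × List String)) (x : List String) : Decidable (Pre_recurse d x) := by unfold Pre_recurse; infer_instance

def pvWitness_recurse : (List (String × List String)) × List String :=
  ([("a", ["b"])], ["a", "c", "a", "c"])

def Spec_recurse (d : List (String × List String)) (x : List String) (out : List (String × List String)) : Prop := out = recurse_alt d x
instance (d : List (String × List String)) (x : List String) (out : List (String × List String)) : Decidable (Spec_recurse d x out) := by unfold Spec_recurse; infer_instance

-- ===== CLAIM (what is proved, stated in full; the proofs are below) =====
def Claim_equal_recurse : Prop := ∀ (d : List (String × List String)) (x : List String), Dom_recurse d x → Pre_recurse d x → Spec_recurse d x (recurse d x)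

-- ===== LEMMAS AND PROOFS =====
theorem get_pvDSet (d : List (String × List String)) (k v k') :
    pvDGet? (pvDSet d k v) k' = if k = k' then some v else pvDGet? d k' := by
  induction d with
  | nil => by_cases h : k = k' <;> simp [pvDSet, pvDGet?, h]
  | cons p r ih =>
    obtain ⟨k'', v''⟩ := p
    simp only [pvDSet]
    by_cases h1 : k'' = k
    · subst h1
      by_cases h2 : k'' = k' <;> simp [pvDGet?, h2]
    · simp only [if_neg h1, pvDGet?]
      by_cases h2 : k'' = k' <;> simp [h2, ih]
      · intro hkk
        exact absurd hkk.symm (h2 ▸ h1)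

theorem keys_pvDSet (d : List (String × List String)) (k v) :
    (pvDSet d k v).map Prod.fst =
      if k ∈ d.map Prod.fst then d.map Prod.fst else d.map Prod.fst ++ [k] := by
  induction d with
  | nil => simp [pvDSet]
  | cons p r ih =>
    obtain ⟨k'', v''⟩ := p
    by_cases h1 : k'' = k
    · simp [pvDSet, h1]
    · by_cases h2 : k ∈ r.map Prod.fst <;>
        simp [pvDSet, h1, Ne.symm h1, h2, ih]

theorem get_none_iff (d : List (String × List String)) (k) :
    pvDGet? d k = none ↔ k ∉ d.map Prod.fst := by
  induction d with
  | nil => simp [pvDGet?]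
  | cons p r ih =>
    obtain ⟨k'', v''⟩ := p
    by_cases h : k'' = k
    · simp [pvDGet?, h]
    · simp [pvDGet?, h, ih, Ne.symm h]

theorem keys_pvStep (d : List (String × List String)) (a b) :
    (pvStep d a b).map Prod.fst =
      if a ∈ d.map Prod.fst then d.map Prod.fst else d.map Prod.fst ++ [a] := by
  unfold pvStep
  cases hg : pvDGet? d a with
  | none =>
    have hmem : a ∉ d.map Prod.fst := (get_none_iff d a).mp hg
    simp [keys_pvDSet, hmem]
  | some vs =>
    have hmem : a ∈ d.map Prod.fst := by
      by_contra h
      rw [← get_none_iff d a] at h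
      simp [hg] at h
    by_cases hb : b ∈ vs <;> simp [hb, keys_pvDSet, hmem]

theorem get_pvStep (d : List (String × List String)) (a b k) :
    pvDGet? (pvStep d a b) k =
      if a = k then
        some (if b ∈ (pvDGet? d a).getD [] then (pvDGet? d a).getD []
              else (pvDGet? d a).getD [] ++ [b])
      else pvDGet? d k := by
  unfold pvStep
  cases hg : pvDGet? d a with
  | none =>
    by_cases h : a = k <;> simp [get_pvDSet, h]
  | some vs =>
    by_cases hb : b ∈ vs
    · by_cases h : a = k <;> simp [hb, h]
      · subst h; simp [hg]
    · by_cases h : a = k <;> simp [hb, get_pvDSet, h]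

theorem nodup_pvStep (d : List (String × List String)) (a b)
    (h : (d.map Prod.fst).Nodup) : ((pvStep d a b).map Prod.fst).Nodup := by
  rw [keys_pvStep]
  by_cases hm : a ∈ d.map Prod.fst
  · simpa [hm] using h
  · simp [hm, List.nodup_append, h]
    rintro a1 x hmem rfl
    exact hm (List.mem_map.mpr ⟨(a1, x), hmem, rfl⟩)

-- the grouped rebuild as a function of the pair list
def altPairs (d : List (String × List String)) (ps : List (String × String)) :
    List (String × List String) :=
  (bKeys (d.map Prod.fst) ps).map (fun k => (k, bVal ((pvDGet? d k).getD []) k ps))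

theorem altPairs_nil (d : List (String × List String))
    (h : (d.map Prod.fst).Nodup) : altPairs d [] = d := by
  unfold altPairs bKeys bVal
  simp only [List.foldl]
  induction d with
  | nil => simp
  | cons p r ih =>
    obtain ⟨k, v⟩ := p
    rw [List.map_cons, List.nodup_cons] at h
    simp only [List.map_cons]
    refine congrArg₂ List.cons ?_ ?_
    · simp [pvDGet?]
    · have hcong : List.map (fun k' => (k', (pvDGet? ((k, v) :: r) k').getD [])) (List.map Prod.fst r)
          = List.map (fun k' => (k', (pvDGet? r k').getD [])) (List.map Prod.fst r) := by
        apply List.map_congr_left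
        intro k' hk'
        have hne : k ≠ k' := by rintro rfl; exact h.1 hk'
        simp [pvDGet?, hne]
      rw [hcong, ih h.2]

theorem altPairs_cons (d : List (String × List String)) (a b ps) :
    altPairs d ((a, b) :: ps) = altPairs (pvStep d a b) ps := by
  unfold altPairs
  have hkeys : bKeys (d.map Prod.fst) ((a, b) :: ps)
      = bKeys ((pvStep d a b).map Prod.fst) ps := by
    unfold bKeys
    simp only [List.foldl_cons]
    rw [keys_pvStep]
  rw [hkeys]
  apply List.map_congr_left
  intro k _
  have hval : bVal ((pvDGet? d k).getD []) k ((a, b) :: ps)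
      = bVal ((pvDGet? (pvStep d a b) k).getD []) k ps := by
    unfold bVal
    simp only [List.foldl_cons]
    rw [get_pvStep]
    by_cases h : a = k
    · subst h; simp
    · simp [h]
  rw [hval]

theorem foldl_eq_altPairs (ps : List (String × String)) :
    ∀ d, (d.map Prod.fst).Nodup →
      ps.foldl (fun d p => pvStep d p.1 p.2) d = altPairs d ps := by
  induction ps with
  | nil => intro d h; simpa using (altPairs_nil d h).symm
  | cons p r ih =>
    intro d h
    obtain ⟨a, b⟩ := p
    rw [List.foldl_cons, altPairs_cons]
    exact ih (pvStep d a b) (nodup_pvStep d a b h)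

theorem recurse_eq_foldl (x : List String) :
    ∀ d, recurse d x = (x.zip (x.drop 1)).foldl (fun d p => pvStep d p.1 p.2) d := by
  induction x with
  | nil => intro d; simp [recurse]
  | cons a xs ih =>
    intro d
    cases xs with
    | nil => simp [recurse]
    | cons b rest =>
      simp only [recurse, List.drop, List.zip, List.zipWith, List.foldl]
      exact ih (pvStep d a b)

-- ===== VERDICT (by name: the statement is the Claim_ definition above) =====
theorem recurse_spec : Claim_equal_recurse := by
  intro d x _ hpre
  unfold Spec_recurse recurse_alt
  rw [recurse_eq_foldl]
  exact foldl_eq_altPairs _ d hpre
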